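-- pv_equiv track=rewrite | github.com/u-blox/ucxclient | windows_gui/ucx_api_executor.py | _extract_parameters_from_at_command
-- ===== SOURCE A (Python) =====
-- from typing import Dict, List, Optional, Any, Tuple, Union
--
-- def _extract_parameters_from_at_command(at_command: str) -> List[str]:
--     """Extract parameter values from AT command string
--
--     Examples:
--         AT+UWHN=myhost -> ['myhost']
--         AT+UWSC=0,2,1 -> ['0', '2', '1']
--         AT+UWHN? -> []
--     """
--     # Check if command has parameters (contains =)
--     if '=' not in at_command:
--         return []
--
--     # Split by = and get the parameter part
--     parts = at_command.split('=', 1)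
--
--     if len(parts) < 2 or not parts[1].strip():
--         return []
--
--     param_string = parts[1].strip()
--
--     # Split by comma to get individual parameters
--     # Handle quoted strings if needed
--     parameters = []
--     current_param = ""
--     in_quotes = False
--
--     for char in param_string:
--         if char == '"':
--             in_quotes = not in_quotes
--         elif char == ',' and not in_quotes:
--             if current_param:
--                 parameters.append(current_param.strip())
--             current_param = ""
--         else:
--             current_param += char
--
--     # Add the last parameter
--     if current_param:
--         parameters.append(current_param.strip())
--
--     return parameters
-- ===== SOURCE B (Python) =====
-- def _extract_parameters_from_at_command(at_command):
--     """Extract parameter values from AT command string (quote-splitting variant)."""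
--     if '=' not in at_command:
--         return []
--     parts = at_command.split('=', 1)
--     if len(parts) < 2 or not parts[1].strip():
--         return []
--     param_string = parts[1].strip()
--
--     # Split on '"': even-indexed segments are outside quotes (commas delimit),
--     # odd-indexed are inside quotes (commas are literal); quotes themselves drop.
--     raw = ['']
--     for i, seg in enumerate(param_string.split('"')):
--         if i % 2 == 0:
--             pieces = seg.split(',')
--             raw[-1] += pieces[0]
--             raw.extend(pieces[1:])
--         else:
--             raw[-1] += seg
--     return [p.strip() for p in raw if p]
-- ===== Notes on version B (the rewrite author's own statement) =====
-- stated objective: alternative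
-- what changed: A's per-character quote-toggling state machine is replaced by splitting the parameter string on '"' and splitting only the even (unquoted) segments on ',', accumulating raw pieces and finally stripping/filtering them.
import Mathlib
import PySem

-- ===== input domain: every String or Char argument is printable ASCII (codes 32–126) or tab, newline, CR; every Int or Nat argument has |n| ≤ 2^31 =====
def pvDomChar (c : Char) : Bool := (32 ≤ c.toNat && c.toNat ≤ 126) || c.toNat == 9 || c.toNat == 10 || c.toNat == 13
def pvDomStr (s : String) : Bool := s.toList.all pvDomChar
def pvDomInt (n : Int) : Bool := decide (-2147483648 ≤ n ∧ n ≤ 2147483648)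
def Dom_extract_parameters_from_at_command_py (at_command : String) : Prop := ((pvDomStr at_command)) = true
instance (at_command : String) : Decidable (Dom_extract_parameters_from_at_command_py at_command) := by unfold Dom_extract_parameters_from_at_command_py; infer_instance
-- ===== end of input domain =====

-- B replaces A's per-character quote state machine by splitting on '"' and splitting only the
-- even (unquoted) segments on ',' (objective: alternative decomposition, same cost).

-- ===== PORT A =====
-- A's per-character loop: state = (parameters, current_param, in_quotes)
def pvAStep (st : List (List Char) × List Char × Bool) (c : Char) :
    List (List Char) × List Char × Bool :=
  let (params, cur, inq) := st
  if c = '"' then (params, cur, !inq)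
  else if c = ',' ∧ inq = false then
    (if cur ≠ [] then params ++ [PySem.Chars.strip cur] else params, [], inq)
  else (params, cur ++ [c], inq)

def extract_parameters_from_at_command_py (at_command : String) : List String :=
  let s := at_command.toList
  if PySem.Chars.isIn ['='] s = false then []
  else
    let parts := PySem.Chars.splitOnMax s ['='] 1
    if parts.length < 2 ∨ PySem.Chars.strip (parts.getD 1 []) = [] then []
    else
      let param_string := PySem.Chars.strip (parts.getD 1 [])
      let (params, cur, _) := param_string.foldl pvAStep ([], [], false)
      let params := if cur ≠ [] then params ++ [PySem.Chars.strip cur] else params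
      params.map (fun p => String.mk p)

-- ===== PORT B =====
-- raw list kept as (last, othersRev): Python's raw[-1] is `last`, earlier entries reversed.
-- even segment: raw[-1] += pieces[0]; raw.extend(pieces[1:])
def pvAltEven (st : List Char × List (List Char)) (pieces : List (List Char)) :
    List Char × List (List Char) :=
  pieces.tail.foldl (fun st p => (p, st.1 :: st.2)) (st.1 ++ pieces.headI, st.2)

def pvAltLoop : List (List Char) → Nat → (List Char × List (List Char)) → List Char × List (List Char)
  | [], _, st => st
  | seg :: rest, i, st =>
      if i % 2 = 0 then
        pvAltLoop rest (i + 1) (pvAltEven st (PySem.Chars.splitOn seg [',']))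
      else
        pvAltLoop rest (i + 1) (st.1 ++ seg, st.2)

def extract_parameters_from_at_command_py_alt (at_command : String) : List String :=
  let s := at_command.toList
  if PySem.Chars.isIn ['='] s = false then []
  else
    let parts := PySem.Chars.splitOnMax s ['='] 1
    if parts.length < 2 ∨ PySem.Chars.strip (parts.getD 1 []) = [] then []
    else
      let param_string := PySem.Chars.strip (parts.getD 1 [])
      let (last, othersRev) := pvAltLoop (PySem.Chars.splitOn param_string ['"']) 0 ([], [])
      let raw := (last :: othersRev).reverse
      ((raw.filter (fun p => !p.isEmpty)).map PySem.Chars.strip).map (fun p => String.mk p)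

-- ===== PRECONDITION & SPEC =====
def Spec_extract_parameters_from_at_command_py (at_command : String) (out : List String) : Prop := out = extract_parameters_from_at_command_py_alt at_command
instance (at_command : String) (out : List String) : Decidable (Spec_extract_parameters_from_at_command_py at_command out) := by unfold Spec_extract_parameters_from_at_command_py; infer_instance

-- ===== CLAIM (what is proved, stated in full; the proofs are below) =====
def Claim_equal_extract_parameters_from_at_command_py : Prop := ∀ (at_command : String), Dom_extract_parameters_from_at_command_py at_command → Spec_extract_parameters_from_at_command_py at_command (extract_parameters_from_at_command_py at_command)

-- ===== LEMMAS AND PROOFS =====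

-- recursive characterisation of splitOn with a single-character separator
def pvSplit1 (q : Char) : List Char → List (List Char)
  | [] => [[]]
  | c :: rest =>
      if c = q then [] :: pvSplit1 q rest
      else
        match pvSplit1 q rest with
        | [] => [[c]]
        | h :: t => (c :: h) :: t

theorem pvSplit1_ne_nil (q : Char) (s : List Char) : pvSplit1 q s ≠ [] := by
  cases s with
  | nil => simp [pvSplit1]
  | cons c rest =>
    simp only [pvSplit1]
    split
    · simp
    · cases pvSplit1 q rest <;> simp

def pvGlue (x : List Char) : List (List Char) → List (List Char)
  | [] => [x]
  | h :: t => (x ++ h) :: t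

theorem pvGo_spec (q : Char) (fuel : Nat) :
    ∀ (s cur : List Char) (acc : List (List Char)), s.length < fuel →
      PySem.Chars.splitOn.go [q] fuel s cur acc
        = acc.reverse ++ pvGlue cur.reverse (pvSplit1 q s) := by
  induction fuel with
  | zero => intro s cur acc h; omega
  | succ fuel ih =>
    intro s cur acc h
    cases s with
    | nil =>
      simp [PySem.Chars.splitOn.go, pvSplit1, pvGlue]
    | cons c rest =>
      by_cases hc : c = q
      · subst hc
        have hpre : List.isPrefixOf [c] (c :: rest) = true := by simp [List.isPrefixOf]
        rw [PySem.Chars.splitOn.go]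
        simp only [hpre, if_pos]
        simp only [List.length_cons, List.length_nil, List.drop_succ_cons, List.drop_zero]
        rw [ih rest [] (cur.reverse :: acc) (by simpa using Nat.lt_of_succ_lt_succ h)]
        have := pvSplit1_ne_nil c rest
        cases hP : pvSplit1 c rest with
        | nil => exact absurd hP this
        | cons p ps => simp [pvSplit1, pvGlue, hP]
      · have hpre : List.isPrefixOf [q] (c :: rest) = false := by
          simp [List.isPrefixOf, Ne.symm hc]
        rw [PySem.Chars.splitOn.go]
        simp only [hpre, Bool.false_eq_true, if_false]
        rw [ih rest (c :: cur) acc (by simpa using Nat.lt_of_succ_lt_succ h)]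
        have := pvSplit1_ne_nil q rest
        cases hP : pvSplit1 q rest with
        | nil => exact absurd hP this
        | cons p ps => simp [pvSplit1, pvGlue, hc, hP]

theorem pvSplitOn_eq_pvSplit1 (s : List Char) (q : Char) :
    PySem.Chars.splitOn s [q] = pvSplit1 q s := by
  unfold PySem.Chars.splitOn
  rw [pvGo_spec q (s.length + 1) s [] [] (by omega)]
  have := pvSplit1_ne_nil q s
  cases hP : pvSplit1 q s with
  | nil => exact absurd hP this
  | cons p ps => simp [pvGlue]

-- char-level recursion equivalent to B's segment loop
def pvCLoop : List Char → Bool → (List Char × List (List Char)) → List Char × List (List Char)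
  | [], _, st => st
  | c :: rest, inq, st =>
      if c = '"' then pvCLoop rest (!inq) st
      else if c = ',' ∧ inq = false then pvCLoop rest inq ([], st.1 :: st.2)
      else pvCLoop rest inq (st.1 ++ [c], st.2)

theorem pvAltLoop_split (cs : List Char) :
    ∀ (i : Nat) (st : List Char × List (List Char)),
      pvAltLoop (pvSplit1 '"' cs) i st = pvCLoop cs (decide (i % 2 = 1)) st := by
  induction cs with
  | nil =>
    intro i st
    rcases Nat.mod_two_eq_zero_or_one i with h | h <;>
      simp [pvSplit1, pvAltLoop, pvCLoop, h, pvAltEven, pvSplitOn_eq_pvSplit1]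
  | cons c rest ih =>
    intro i st
    by_cases hq : c = '"'
    · subst hq
      have hs : pvSplit1 '"' ('"' :: rest) = [] :: pvSplit1 '"' rest := by simp [pvSplit1]
      rw [hs, pvAltLoop]
      rcases Nat.mod_two_eq_zero_or_one i with h | h
      · have h1 : (i + 1) % 2 = 1 := by omega
        rw [if_pos h, ih (i + 1) _]
        have he : pvAltEven st (PySem.Chars.splitOn [] [',']) = st := by
          rw [pvSplitOn_eq_pvSplit1]
          simp [pvSplit1, pvAltEven]
        rw [he]
        simp [pvCLoop, h, h1]
      · have h1 : (i + 1) % 2 = 0 := by omega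
        rw [if_neg (by omega), ih (i + 1) _]
        simp [pvCLoop, h, h1]
    · have hM := pvSplit1_ne_nil '"' rest
      rcases hP : pvSplit1 '"' rest with _ | ⟨m0, M'⟩
      · exact absurd hP hM
      have hsplit : pvSplit1 '"' (c :: rest) = (c :: m0) :: M' := by
        simp [pvSplit1, hq, hP]
      rw [hsplit, pvAltLoop]
      rcases Nat.mod_two_eq_zero_or_one i with h | h
      · -- outside quotes
        rw [if_pos h]
        by_cases hcomma : c = ','
        · subst hcomma
          have hseg : PySem.Chars.splitOn (',' :: m0) [','] = [] :: pvSplit1 ',' m0 := by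
            rw [pvSplitOn_eq_pvSplit1]; simp [pvSplit1]
          have key : pvAltEven st ([] :: pvSplit1 ',' m0)
              = pvAltEven ([], st.1 :: st.2) (pvSplit1 ',' m0) := by
            have := pvSplit1_ne_nil ',' m0
            cases hQ : pvSplit1 ',' m0 with
            | nil => exact absurd hQ this
            | cons p ps => simp [pvAltEven]
          rw [hseg, key]
          have hih := ih i ([], st.1 :: st.2)
          rw [hP, pvAltLoop, if_pos h, pvSplitOn_eq_pvSplit1] at hih
          rw [hih]
          simp [pvCLoop, hq, h]
        · have hseg : PySem.Chars.splitOn (c :: m0) [',']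
              = (c :: (pvSplit1 ',' m0).headI) :: (pvSplit1 ',' m0).tail := by
            rw [pvSplitOn_eq_pvSplit1]
            have := pvSplit1_ne_nil ',' m0
            cases hQ : pvSplit1 ',' m0 with
            | nil => exact absurd hQ this
            | cons p ps => simp [pvSplit1, hcomma, hQ]
          have key : pvAltEven st ((c :: (pvSplit1 ',' m0).headI) :: (pvSplit1 ',' m0).tail)
              = pvAltEven (st.1 ++ [c], st.2) (pvSplit1 ',' m0) := by
            have := pvSplit1_ne_nil ',' m0
            cases hQ : pvSplit1 ',' m0 with
            | nil => exact absurd hQ this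
            | cons p ps => simp [pvAltEven]
          rw [hseg, key]
          have hih := ih i (st.1 ++ [c], st.2)
          rw [hP, pvAltLoop, if_pos h, pvSplitOn_eq_pvSplit1] at hih
          rw [hih]
          simp [pvCLoop, hq, hcomma, h]
      · -- inside quotes: whole segment appended to last
        rw [if_neg (by omega)]
        have hih := ih i (st.1 ++ [c], st.2)
        rw [hP, pvAltLoop, if_neg (by omega)] at hih
        simp only at hih
        rw [show st.1 ++ [c] ++ m0 = st.1 ++ (c :: m0) by simp] at hih
        rw [hih]
        simp [pvCLoop, hq, h]

-- A's flushed-parameters component as a function of B's othersRev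
def pvF (others : List (List Char)) : List (List Char) :=
  (others.reverse.filter (fun p => !p.isEmpty)).map PySem.Chars.strip

def pvAFin (st : List (List Char) × List Char × Bool) : List (List Char) :=
  if st.2.1 ≠ [] then st.1 ++ [PySem.Chars.strip st.2.1] else st.1

def pvOut (st : List Char × List (List Char)) : List (List Char) :=
  (((st.1 :: st.2).reverse.filter (fun p => !p.isEmpty)).map PySem.Chars.strip)

theorem pvF_cons (cur : List Char) (others : List (List Char)) :
    pvF (cur :: others)
      = if cur ≠ [] then pvF others ++ [PySem.Chars.strip cur] else pvF others := by
  unfold pvF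
  cases cur <;> simp [List.filter_append]

theorem pvA_eq_pvCLoop (cs : List Char) :
    ∀ (inq : Bool) (cur : List Char) (others : List (List Char)),
      pvAFin (cs.foldl pvAStep (pvF others, cur, inq)) = pvOut (pvCLoop cs inq (cur, others)) := by
  induction cs with
  | nil =>
    intro inq cur others
    simp only [List.foldl_nil, pvCLoop, pvAFin, pvOut, pvF]
    cases cur <;> simp [List.filter_append]
  | cons c rest ih =>
    intro inq cur others
    by_cases hq : c = '"'
    · subst hq
      rw [List.foldl_cons,
        show pvAStep (pvF others, cur, inq) '"' = (pvF others, cur, !inq) from by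
          simp [pvAStep],
        show pvCLoop ('"' :: rest) inq (cur, others) = pvCLoop rest (!inq) (cur, others) from by
          simp [pvCLoop]]
      exact ih (!inq) cur others
    · by_cases hcm : c = ',' ∧ inq = false
      · obtain ⟨hc, hinq⟩ := hcm
        subst hc hinq
        rw [List.foldl_cons,
          show pvAStep (pvF others, cur, false) ','
              = (if cur ≠ [] then pvF others ++ [PySem.Chars.strip cur] else pvF others, [], false)
            from by simp [pvAStep, hq],
          show pvCLoop (',' :: rest) false (cur, others) = pvCLoop rest false ([], cur :: others)
            from by simp [pvCLoop, hq],
          ← pvF_cons]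
        exact ih false [] (cur :: others)
      · rw [List.foldl_cons,
          show pvAStep (pvF others, cur, inq) c = (pvF others, cur ++ [c], inq) from by
            simp only [pvAStep]
            rw [if_neg hq, if_neg hcm],
          show pvCLoop (c :: rest) inq (cur, others) = pvCLoop rest inq (cur ++ [c], others) from by
            simp only [pvCLoop]
            rw [if_neg hq, if_neg hcm]]
        exact ih inq (cur ++ [c]) others

-- ===== VERDICT (by name: the statement is the Claim_ definition above) =====
set_option maxHeartbeats 2000000 in
theorem extract_parameters_from_at_command_py_spec : Claim_equal_extract_parameters_from_at_command_py := by
  intro at_command _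
  unfold Spec_extract_parameters_from_at_command_py
  unfold extract_parameters_from_at_command_py extract_parameters_from_at_command_py_alt
  dsimp only
  split_ifs with h1 h2 h3 <;> try rfl
  all_goals
    set S := PySem.Chars.strip
        ((PySem.Chars.splitOnMax at_command.toList ['='] 1).getD 1 []) with hS
  all_goals
    have key := pvA_eq_pvCLoop S false [] []
  all_goals
    rw [show pvF ([] : List (List Char)) = [] from rfl] at key
  all_goals
    have hB : pvAltLoop (PySem.Chars.splitOn S ['"']) 0 ([], [])
        = pvCLoop S false ([], []) := by
      rw [pvSplitOn_eq_pvSplit1, pvAltLoop_split]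
      norm_num
  all_goals
    rw [← hB] at key
  all_goals
    rcases hA : List.foldl pvAStep ([], [], false) S with ⟨params, cur, b⟩
  all_goals
    rcases hBst : pvAltLoop (PySem.Chars.splitOn S ['"']) 0 ([], []) with ⟨last, othersRev⟩
  all_goals
    rw [hA, hBst] at key
  all_goals
    simp only [pvAFin, pvOut] at key
  all_goals
    rw [hA] at h3
  all_goals
    simp only at h3
  · rw [if_pos h3] at key
    simp only [hA]
    rw [key]
  · rw [if_neg h3] at key
    simp only [hA]
    rw [key]
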